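-- pv_equiv track=rewrite | github.com/muhrin/milad | milad/utils.py | nl_pairs
-- ===== SOURCE A (Python) =====
-- from typing import Union, Sized, Iterator, Sequence, Optional, Tuple, List
--
-- def even(val: int) -> bool:
--     """Test if an integer is event.  Returns True if so."""
--     return (val % 2) == 0
--
-- def odd(val: int) -> bool:
--     """Test if an integer is odd.  Returns True if so."""
--     return not even(val)
--
-- def inclusive(*args) -> Iterator[int]:
--     """Like range() but inclusive of upper bound and automatically does iteration of ranges with a
--     negative step e.g. 0, -4 will produce a range containing 0, -1, -2, -3, -4"""
--     if len(args) not in (1, 2, 3):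
--         raise ValueError('Takes one or two args, got: {}'.format(args))
--
--     if len(args) == 3:
--         # Assume form is start, stop, step
--         start, stop, step = args
--     else:
--         if len(args) == 1:
--             start = 0
--             stop = args[0]
--         else:
--             start = args[0]
--             stop = args[1]
--
--         step = 1 if start <= stop else -1
--
--     sign = 1 if step > 0 else -1
--     idx = start
--     while sign * (stop - idx) >= 0:
--         yield idx
--         idx += step
--
-- def nl_pairs(     # pylint: disable=invalid-name
--     n: Union[int, Tuple[int, int]],
--     l: Union[int, Tuple[int, int]] = None,
--     l_le_n=True,
--     n_minus_l_even=True
-- ) -> Iterator[Tuple]: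
--     """Generator that will create n,l pairs for spherical harmonics optionally with l <= s
--
--     :param n: the maximum value of n to go up to
--     :param l: the maximum value of l to go up to
--     :param l_le_n: only yield pairs that satisfy l <= n
--     :param n_minus_l_even: only yield pairs that satisfy even(l - n) == True
--     """
--     if not isinstance(n, tuple):
--         n = (0, n)
--     if l is None:
--         l = 0, n[1]
--     elif not isinstance(l, tuple):
--         # have max l
--         l = 0, l
--
--     for n_ in inclusive(*n, 1):  # pylint: disable=invalid-name
--         if n_minus_l_even and odd(l[0] - n_):
--             l_start = l[0] + 1
--         else:
--             l_start = l[0]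
--
--         for l_ in inclusive(l_start, min(n_, l[1]) if l_le_n else l[1], 2 if n_minus_l_even else 1):  # pylint: disable=invalid-name
--             yield n_, l_
-- ===== SOURCE B (Python) =====
-- def nl_pairs(n, l=None, l_le_n=True, n_minus_l_even=True):
--     """Same pairs as A, but by a full-range scan with a parity filter
--     instead of a parity-adjusted start plus stride-2 stepping."""
--     if not isinstance(n, tuple):
--         n = (0, n)
--     if l is None:
--         l = (0, n[1])
--     elif not isinstance(l, tuple):
--         l = (0, l)
--     for n_ in range(n[0], n[1] + 1):
--         upper = min(n_, l[1]) if l_le_n else l[1]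
--         for l_ in range(l[0], upper + 1):
--             if n_minus_l_even and (l_ - n_) % 2 != 0:
--                 continue
--             yield n_, l_
-- ===== Notes on version B (the rewrite author's own statement) =====
-- stated objective: simpler
-- what changed: Replaces A's hand-rolled inclusive() generator with its parity-adjusted l_start and stride-2 stepping by plain range() scans over the full l interval with a continue on the parity predicate.
import Mathlib
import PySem

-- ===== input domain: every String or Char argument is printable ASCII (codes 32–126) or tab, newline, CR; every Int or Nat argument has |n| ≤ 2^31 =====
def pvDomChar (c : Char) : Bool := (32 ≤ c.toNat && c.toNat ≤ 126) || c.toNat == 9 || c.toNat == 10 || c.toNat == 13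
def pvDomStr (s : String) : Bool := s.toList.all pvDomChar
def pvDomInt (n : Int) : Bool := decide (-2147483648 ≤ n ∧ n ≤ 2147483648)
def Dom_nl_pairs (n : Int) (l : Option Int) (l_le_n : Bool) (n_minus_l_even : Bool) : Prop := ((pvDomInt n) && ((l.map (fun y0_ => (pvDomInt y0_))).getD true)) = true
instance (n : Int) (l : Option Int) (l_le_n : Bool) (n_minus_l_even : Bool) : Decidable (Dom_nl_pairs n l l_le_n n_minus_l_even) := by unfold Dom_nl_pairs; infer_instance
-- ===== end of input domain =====

-- B replaces A's parity-adjusted start and stride-2 inner loop by a full-range scan with a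
-- parity filter (objective: simpler); both yield the same pair sequence.

-- ===== PORT A =====
-- A's `inclusive(start, stop, step)` generator, for the positive steps A uses (1 and 2):
-- `sign = 1`, `while sign * (stop - idx) >= 0: yield idx; idx += step`.
def pvInclusive (start stop step : Int) (hs : 0 < step) : List Int :=
  if _h : 0 ≤ stop - start then
    start :: pvInclusive (start + step) stop step hs
  else []
termination_by (stop - start + 1).toNat
decreasing_by omega

def nl_pairs (n : Int) (l : Option Int) (l_le_n : Bool) (n_minus_l_even : Bool) : List (Int × Int) :=
  -- n is an int here, so `n = (0, n)`; l is an int or None, so `l = (0, l or n)`.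
  let l1 : Int := match l with | none => n | some v => v
  (pvInclusive 0 n 1 (by norm_num)).flatMap (fun n_ =>
    let l_start : Int :=
      if n_minus_l_even && (PySem.Int.mod (0 - n_) 2 != 0) then 0 + 1 else 0
    (pvInclusive l_start (if l_le_n then min n_ l1 else l1)
        (if n_minus_l_even then 2 else 1) (by split <;> norm_num)).map (fun l_ => (n_, l_)))

-- ===== PORT B =====
def nl_pairs_alt (n : Int) (l : Option Int) (l_le_n : Bool) (n_minus_l_even : Bool) : List (Int × Int) :=
  let l1 : Int := match l with | none => n | some v => v
  (PySem.List.pyRange 0 (n + 1) 1).flatMap (fun n_ =>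
    let upper : Int := if l_le_n then min n_ l1 else l1
    (PySem.List.pyRange 0 (upper + 1) 1).filterMap (fun l_ =>
      if n_minus_l_even && (PySem.Int.mod (l_ - n_) 2 != 0) then none else some (n_, l_)))

-- ===== PRECONDITION & SPEC =====
def Spec_nl_pairs (n : Int) (l : Option Int) (l_le_n : Bool) (n_minus_l_even : Bool) (out : List (Int × Int)) : Prop := out = nl_pairs_alt n l l_le_n n_minus_l_even
instance (n : Int) (l : Option Int) (l_le_n : Bool) (n_minus_l_even : Bool) (out : List (Int × Int)) : Decidable (Spec_nl_pairs n l l_le_n n_minus_l_even out) := by unfold Spec_nl_pairs; infer_instance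

-- ===== CLAIM (what is proved, stated in full; the proofs are below) =====
def Claim_equal_nl_pairs : Prop := ∀ (n : Int) (l : Option Int) (l_le_n : Bool) (n_minus_l_even : Bool), Dom_nl_pairs n l l_le_n n_minus_l_even → Spec_nl_pairs n l l_le_n n_minus_l_even (nl_pairs n l l_le_n n_minus_l_even)

-- ===== LEMMAS AND PROOFS =====

theorem pv_mod2 (x : Int) : PySem.Int.mod x 2 = x % 2 :=
  PySem.Int.mod_eq_emod_of_pos (by norm_num)

-- inclusive(a, b, 1) = range(a, b+1)
theorem pvInclusive_one_eq_pyRange (a b : Int) (h : 0 < (1:Int)) :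
    pvInclusive a b 1 h = PySem.List.pyRange a (b + 1) 1 := by
  by_cases hab : 0 ≤ b - a
  · rw [pvInclusive, dif_pos hab, PySem.List.pyRange_one_cons (by omega)]
    exact congrArg (a :: ·) (pvInclusive_one_eq_pyRange (a + 1) b h)
  · rw [pvInclusive, dif_neg hab, PySem.List.pyRange_one_eq_nil (by omega)]
termination_by (b - a + 1).toNat
decreasing_by omega

-- filterMap with an if-skip is filter-then-map
theorem filterMap_if_skip {α β : Type} (p : α → Bool) (g : α → β) (xs : List α) :
    xs.filterMap (fun x => if p x then none else some (g x)) =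
    (xs.filter (fun x => !p x)).map g := by
  induction xs with
  | nil => rfl
  | cons x xs ih =>
    by_cases hx : p x = true <;> simp [List.filter_cons, hx, ih]

-- Filtering range(a, b+1) to the residue class of c mod 2 is A's stride-2 scan from the
-- parity-adjusted start.
theorem filter_parity_eq_stride2 (c : Int) (h2 : 0 < (2:Int)) : ∀ (a b : Int),
    (PySem.List.pyRange a (b + 1) 1).filter (fun x => !(PySem.Int.mod (x - c) 2 != 0)) =
    pvInclusive (if PySem.Int.mod (a - c) 2 != 0 then a + 1 else a) b 2 h2 := by
  intro a b
  by_cases hab : 0 ≤ b - a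
  · rw [PySem.List.pyRange_one_cons (by omega), List.filter_cons]
    have ih := filter_parity_eq_stride2 c h2 (a + 1) b
    by_cases hp : PySem.Int.mod (a - c) 2 = 0
    · have hp' : (a - c) % 2 = 0 := by rw [← pv_mod2]; exact hp
      have hnext' : (a + 1 - c) % 2 ≠ 0 := by omega
      rw [if_pos (by simp <;> omega)] at ih
      rw [show a + 1 + 1 = a + 2 from by ring] at ih
      have hexp : pvInclusive a b 2 h2 = a :: pvInclusive (a + 2) b 2 h2 := by
        rw [pvInclusive, dif_pos hab]
      rw [if_pos (by simp <;> omega), if_neg (by simp <;> omega), ih, hexp]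
    · have hp' : (a - c) % 2 ≠ 0 := by rw [← pv_mod2]; exact hp
      have hnext' : (a + 1 - c) % 2 = 0 := by omega
      rw [if_neg (by simp <;> omega)] at ih
      rw [if_neg (by simp <;> omega), if_pos (by simp <;> omega)]
      exact ih
  · rw [PySem.List.pyRange_one_eq_nil (by omega), List.filter_nil]
    split
    · rw [pvInclusive, dif_neg (by omega)]
    · rw [pvInclusive, dif_neg (by omega)]
termination_by a b => (b + 1 - a).toNat
decreasing_by omega

theorem nl_pairs_eq_alt (n : Int) (l : Option Int) (l_le_n : Bool) (n_minus_l_even : Bool) :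
    nl_pairs n l l_le_n n_minus_l_even = nl_pairs_alt n l l_le_n n_minus_l_even := by
  simp only [nl_pairs, nl_pairs_alt]
  rw [pvInclusive_one_eq_pyRange]
  refine congrArg (fun f => List.flatMap f (PySem.List.pyRange 0 (n + 1) 1))
    (funext fun n_ => ?_)
  cases n_minus_l_even with
  | false =>
    simp only [Bool.false_and, Bool.false_eq_true, if_false]
    rw [pvInclusive_one_eq_pyRange]
    simp
  | true =>
    simp only [Bool.true_and, if_true]
    rw [filterMap_if_skip (fun l_ => PySem.Int.mod (l_ - n_) 2 != 0) (fun l_ => (n_, l_))]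
    rw [filter_parity_eq_stride2 n_ (by norm_num) 0
      (if l_le_n = true then min n_ (match l with | none => n | some v => v)
       else (match l with | none => n | some v => v))]

-- ===== VERDICT (by name: the statement is the Claim_ definition above) =====
theorem nl_pairs_spec : Claim_equal_nl_pairs := by
  intro n l l_le_n n_minus_l_even _
  exact nl_pairs_eq_alt n l l_le_n n_minus_l_even
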